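-- pv_equiv track=rewrite | github.com/KimSangOuk/Coding_Test | CodingTest/Coding_Test/BAEKJOON/23291.py | control_fish_number
-- ===== SOURCE A (Python) =====
-- dx=[0,0,-1,1]
--
-- dy=[-1,1,0,0]
--
-- def control_fish_number(fish_tanks):
--     height=len(fish_tanks)
--     point=len(fish_tanks[0])
--     w=len(fish_tanks[height-1])
--     visited=set()
--     up_and_down=[[0]*w for _ in range(height)]
--     for i in range(height):
--         if i!=height-1:
--             for j in range(point):
--                 now=(i,j)
--                 for t in range(4):
--                     nx=now[0]+dx[t]
--                     ny=now[1]+dy[t]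
--                     if nx<0 or ny<0 or nx>=height or ny>=w:
--                         continue
--                     if 0<=nx<height-1 and ny>=point:
--                         continue
--                     tmp=[now,(nx,ny)]
--                     tmp.sort()
--                     tmp=tuple(tmp)
--                     if tmp in visited:
--                         continue
--                     visited.add(tmp)
--                     d=abs(fish_tanks[now[0]][now[1]]-fish_tanks[nx][ny])//5
--                     if d>0:
--                         if fish_tanks[now[0]][now[1]]>fish_tanks[nx][ny]:
--                             up_and_down[now[0]][now[1]]-=d
--                             up_and_down[nx][ny]+=d
--                         elif fish_tanks[now[0]][now[1]]<fish_tanks[nx][ny]: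
--                             up_and_down[now[0]][now[1]]+=d
--                             up_and_down[nx][ny]-=d
--         else:
--             for j in range(w):
--                 now=(i,j)
--                 for t in range(4):
--                     nx=now[0]+dx[t]
--                     ny=now[1]+dy[t]
--                     if nx<0 or ny<0 or nx>=height or ny>=w:
--                         continue
--                     if 0<=nx<height-1 and ny>=point:
--                         continue
--                     tmp=[now,(nx,ny)]
--                     tmp.sort()
--                     tmp=tuple(tmp)
--                     if tmp in visited:
--                         continue
--                     visited.add(tmp)
--                     d=abs(fish_tanks[now[0]][now[1]]-fish_tanks[nx][ny])//5
--                     if d>0: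
--                         if fish_tanks[now[0]][now[1]]>fish_tanks[nx][ny]:
--                             up_and_down[now[0]][now[1]]-=d
--                             up_and_down[nx][ny]+=d
--                         elif fish_tanks[now[0]][now[1]]<fish_tanks[nx][ny]:
--                             up_and_down[now[0]][now[1]]+=d
--                             up_and_down[nx][ny]-=d
--
--     for i in range(height):
--         if i!=height-1:
--             for j in range(point):
--                 fish_tanks[i][j]+=up_and_down[i][j]
--         else:
--             for j in range(w):
--                 fish_tanks[i][j]+=up_and_down[i][j]
--     return fish_tanks
-- ===== SOURCE B (Python) =====
-- def control_fish_number(fish_tanks):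
--     height = len(fish_tanks)
--     point = len(fish_tanks[0])
--     w = len(fish_tanks[height - 1])
--
--     def width(i):
--         return point if i != height - 1 else w
--
--     # enumerate each undirected edge once: right edge then down edge per cell
--     edges = []
--     for i in range(height):
--         for j in range(width(i)):
--             if j + 1 < width(i):
--                 edges.append((i, j, i, j + 1))
--             if i + 1 < height and j < width(i + 1):
--                 edges.append((i, j, i + 1, j))
--
--     up = [[0] * w for _ in range(height)]
--     for (a, b, c, e) in edges:
--         d = abs(fish_tanks[a][b] - fish_tanks[c][e]) // 5
--         if d > 0:
--             if fish_tanks[a][b] > fish_tanks[c][e]: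
--                 up[a][b] -= d
--                 up[c][e] += d
--             elif fish_tanks[a][b] < fish_tanks[c][e]:
--                 up[a][b] += d
--                 up[c][e] -= d
--
--     return [[fish_tanks[i][j] + up[i][j] for j in range(width(i))]
--             + fish_tanks[i][width(i):]
--             for i in range(height)]
-- ===== Notes on version B (the rewrite author's own statement) =====
-- stated objective: simpler
-- what changed: B replaces A's 4-direction dx/dy neighbour scan with a visited-set dedup by a single enumeration of each undirected edge once (right and down neighbour per cell, with A's width/bounds rules), then rebuilds the rows instead of mutating in place.
import Mathlib
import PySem

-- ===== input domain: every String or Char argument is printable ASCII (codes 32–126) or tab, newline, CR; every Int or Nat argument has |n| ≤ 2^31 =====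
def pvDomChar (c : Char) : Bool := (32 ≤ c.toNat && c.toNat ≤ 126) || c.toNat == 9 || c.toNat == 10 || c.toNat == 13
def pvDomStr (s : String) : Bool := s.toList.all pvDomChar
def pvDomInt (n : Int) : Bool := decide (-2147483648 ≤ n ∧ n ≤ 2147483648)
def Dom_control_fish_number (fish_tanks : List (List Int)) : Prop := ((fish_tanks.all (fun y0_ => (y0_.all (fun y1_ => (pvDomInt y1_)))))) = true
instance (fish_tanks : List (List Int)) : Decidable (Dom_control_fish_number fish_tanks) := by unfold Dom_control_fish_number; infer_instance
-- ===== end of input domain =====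

-- B drops A's `visited` set and 4-direction dx/dy scan: it enumerates each undirected
-- edge once (right + down neighbour per cell) and rebuilds the rows; equal RETURN value
-- (A also mutates its argument in place, B does not — the claim is about the return value).

-- ===== PORT A =====

-- an edge: a pair of (row, col) cells
abbrev PvEdge := (Int × Int) × (Int × Int)

def pvDxA : List Int := [0, 0, -1, 1]
def pvDyA : List Int := [-1, 1, 0, 0]

-- g[i][j] (nonnegative in-range indices at every use site, guaranteed by the guards / Pre_)
def pvGet (g : List (List Int)) (i j : Int) : Int :=
  PySem.List.pyGetD (PySem.List.pyGetD g i []) j 0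

-- g[i][j] += v (nonnegative in-range indices at every use site)
def pvAddAt (g : List (List Int)) (i j v : Int) : List (List Int) :=
  g.modify i.toNat (fun row => row.modify j.toNat (fun x => x + v))

-- the shared inner body of both Pythons: `d=abs(...)//5; if d>0: ...` on one edge
def pvApplyEdge (ft : List (List Int)) (g : List (List Int)) (e : PvEdge) : List (List Int) :=
  let a := pvGet ft e.1.1 e.1.2
  let b := pvGet ft e.2.1 e.2.2
  let d := PySem.Int.floordiv |a - b| 5
  if d > 0 then
    if a > b then pvAddAt (pvAddAt g e.1.1 e.1.2 (-d)) e.2.1 e.2.2 d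
    else if a < b then pvAddAt (pvAddAt g e.1.1 e.1.2 d) e.2.1 e.2.2 (-d)
    else g
  else g

-- one iteration of A's `for t in range(4)` body (state: the visited set and up_and_down)
def pvStepA (ft : List (List Int)) (height point w : Int)
    (st : PySem.Set PvEdge × List (List Int)) (i j t : Int) :
    PySem.Set PvEdge × List (List Int) :=
  let nx := i + PySem.List.pyGetD pvDxA t 0
  let ny := j + PySem.List.pyGetD pvDyA t 0
  if nx < 0 ∨ ny < 0 ∨ nx ≥ height ∨ ny ≥ w then st
  else if 0 ≤ nx ∧ nx < height - 1 ∧ ny ≥ point then st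
  else
    -- tmp = sorted([now, (nx,ny)]) of two distinct pairs = lexicographic min/max (exact)
    let tmp : PvEdge := if nx < i ∨ (nx = i ∧ ny < j) then ((nx, ny), (i, j)) else ((i, j), (nx, ny))
    if PySem.Set.contains st.1 tmp then st
    else (PySem.Set.add st.1 tmp, pvApplyEdge ft st.2 tmp)

def control_fish_number (fish_tanks : List (List Int)) : List (List Int) :=
  let height : Int := fish_tanks.length
  let point : Int := (PySem.List.pyGetD fish_tanks 0 []).length
  let w : Int := (PySem.List.pyGetD fish_tanks (height - 1) []).length
  let up0 : List (List Int) := List.replicate height.toNat (List.replicate w.toNat 0)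
  let st :=
    (PySem.List.pyRange 0 height 1).foldl (fun st i =>
      if i ≠ height - 1 then
        (PySem.List.pyRange 0 point 1).foldl (fun st j =>
          (PySem.List.pyRange 0 4 1).foldl (fun st t => pvStepA fish_tanks height point w st i j t) st) st
      else
        (PySem.List.pyRange 0 w 1).foldl (fun st j =>
          (PySem.List.pyRange 0 4 1).foldl (fun st t => pvStepA fish_tanks height point w st i j t) st) st)
      ((PySem.Set.empty : PySem.Set PvEdge), up0)
  let up := st.2
  (PySem.List.pyRange 0 height 1).foldl (fun ft i =>
    if i ≠ height - 1 then
      (PySem.List.pyRange 0 point 1).foldl (fun ft j => pvAddAt ft i j (pvGet up i j)) ft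
    else
      (PySem.List.pyRange 0 w 1).foldl (fun ft j => pvAddAt ft i j (pvGet up i j)) ft) fish_tanks

-- ===== PORT B =====

-- width(i) of Source B
def pvWidth (height point w i : Int) : Int := if i ≠ height - 1 then point else w

-- Source B's `edges` list: for each cell, its right edge then its down edge
def pvEdgesB (height point w : Int) : List PvEdge :=
  (PySem.List.pyRange 0 height 1).flatMap (fun i =>
    (PySem.List.pyRange 0 (pvWidth height point w i) 1).flatMap (fun j =>
      (if j + 1 < pvWidth height point w i then [((i, j), (i, j + 1))] else []) ++
      (if i + 1 < height ∧ j < pvWidth height point w (i + 1) then [((i, j), (i + 1, j))] else [])))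

def control_fish_number_alt (fish_tanks : List (List Int)) : List (List Int) :=
  let height : Int := fish_tanks.length
  let point : Int := (PySem.List.pyGetD fish_tanks 0 []).length
  let w : Int := (PySem.List.pyGetD fish_tanks (height - 1) []).length
  let up0 : List (List Int) := List.replicate height.toNat (List.replicate w.toNat 0)
  let up := (pvEdgesB height point w).foldl (pvApplyEdge fish_tanks) up0
  (PySem.List.pyRange 0 height 1).map (fun i =>
    (PySem.List.pyRange 0 (pvWidth height point w i) 1).map
      (fun j => pvGet fish_tanks i j + pvGet up i j) ++
    PySem.List.slice (PySem.List.pyGetD fish_tanks i []) (some (pvWidth height point w i)) none)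

-- ===== PRECONDITION & SPEC =====
-- Pre_ = exactly the inputs on which the Python A returns (otherwise an IndexError:
-- fish_tanks empty, or — when there are ≥ 2 rows — some non-last row shorter than the
-- first row, or the first row longer than the last row, which the final add-back loop indexes past).
def Pre_control_fish_number (fish_tanks : List (List Int)) : Prop :=
  fish_tanks ≠ [] ∧
  (1 < fish_tanks.length →
    fish_tanks.headI.length ≤ (fish_tanks.getLast?.getD []).length ∧
    ∀ r ∈ fish_tanks.dropLast, fish_tanks.headI.length ≤ r.length)
instance (fish_tanks : List (List Int)) : Decidable (Pre_control_fish_number fish_tanks) := by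
  unfold Pre_control_fish_number; infer_instance

def pvWitness_control_fish_number : List (List Int) := [[0, 10], [3, 7]]

def Spec_control_fish_number (fish_tanks : List (List Int)) (out : List (List Int)) : Prop := out = control_fish_number_alt fish_tanks
instance (fish_tanks : List (List Int)) (out : List (List Int)) : Decidable (Spec_control_fish_number fish_tanks out) := by unfold Spec_control_fish_number; infer_instance

-- ===== CLAIM (what is proved, stated in full; the proofs are below) =====
def Claim_equal_control_fish_number : Prop := ∀ (fish_tanks : List (List Int)), Dom_control_fish_number fish_tanks → Pre_control_fish_number fish_tanks → Spec_control_fish_number fish_tanks (control_fish_number fish_tanks)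

-- ===== LEMMAS AND PROOFS =====

-- ---------- proof-side definitions ----------

-- fold a candidate-edge list through A's visited-set step
def pvFoldVis (ft : List (List Int)) (st : PySem.Set PvEdge × List (List Int)) (l : List PvEdge) :
    PySem.Set PvEdge × List (List Int) :=
  l.foldl (fun st e =>
    if PySem.Set.contains st.1 e then st
    else (PySem.Set.add st.1 e, pvApplyEdge ft st.2 e)) st

-- the candidate edge A's direction-t probe at cell (i,j) contributes (empty if a guard fires)
def pvCand (height point w i j t : Int) : List PvEdge :=
  let nx := i + PySem.List.pyGetD pvDxA t 0
  let ny := j + PySem.List.pyGetD pvDyA t 0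
  if nx < 0 ∨ ny < 0 ∨ nx ≥ height ∨ ny ≥ w then []
  else if 0 ≤ nx ∧ nx < height - 1 ∧ ny ≥ point then []
  else if nx < i ∨ (nx = i ∧ ny < j) then [((nx, ny), (i, j))]
  else [((i, j), (nx, ny))]

-- all candidates of A's scan, in scan order
def pvCandA (height point w : Int) : List PvEdge :=
  (PySem.List.pyRange 0 height 1).flatMap (fun i =>
    (PySem.List.pyRange 0 (pvWidth height point w i) 1).flatMap (fun j =>
      (PySem.List.pyRange 0 4 1).flatMap (fun t => pvCand height point w i j t)))

-- first occurrences of a candidate list not already in S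
def pvSel (S : PySem.Set PvEdge) : List PvEdge → List PvEdge
  | [] => []
  | e :: es => if PySem.Set.contains S e then pvSel S es else e :: pvSel (PySem.Set.add S e) es

-- ---------- visited-set elimination ----------

theorem pvStepA_eq (ft : List (List Int)) (h p w : Int) (st : PySem.Set PvEdge × List (List Int))
    (i j t : Int) : pvStepA ft h p w st i j t = pvFoldVis ft st (pvCand h p w i j t) := by
  simp only [pvStepA, pvCand, pvFoldVis]
  split_ifs <;> simp_all [List.foldl]


theorem pvFoldVis_snd (ft : List (List Int)) (S : PySem.Set PvEdge) (g : List (List Int))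
    (l : List PvEdge) : (pvFoldVis ft (S, g) l).2 = (pvSel S l).foldl (pvApplyEdge ft) g := by
  induction l generalizing S g with
  | nil => rfl
  | cons e es ih =>
    by_cases hc : e ∈ S
    · have hcc : PySem.Set.contains S e = true := (PySem.Set.contains_iff S e).mpr hc
      simp only [pvFoldVis, List.foldl_cons, pvSel, hcc, if_true] at *
      exact ih S g
    · have hcc : ¬ (PySem.Set.contains S e = true) := fun hx => hc ((PySem.Set.contains_iff S e).mp hx)
      simp only [pvFoldVis, List.foldl_cons, pvSel, if_neg hcc] at *
      exact ih _ _


theorem mem_pvSel (S : PySem.Set PvEdge) (l : List PvEdge) (e : PvEdge) :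
    e ∈ pvSel S l ↔ e ∈ l ∧ e ∉ S := by
  induction l generalizing S with
  | nil => simp [pvSel]
  | cons x xs ih =>
    by_cases hc : x ∈ S
    · have hcc : PySem.Set.contains S x = true := (PySem.Set.contains_iff S x).mpr hc
      rw [pvSel, if_pos hcc, ih]
      simp only [List.mem_cons]
      constructor
      · rintro ⟨h1, h2⟩; exact ⟨Or.inr h1, h2⟩
      · rintro ⟨h1 | h1, h2⟩
        · exact absurd (h1 ▸ hc) h2
        · exact ⟨h1, h2⟩
    · have hcc : ¬ (PySem.Set.contains S x = true) := fun hx => hc ((PySem.Set.contains_iff S x).mp hx)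
      rw [pvSel, if_neg hcc]
      simp only [List.mem_cons, ih, PySem.Set.mem_add]
      constructor
      · rintro (rfl | ⟨h1, h2⟩)
        · exact ⟨Or.inl rfl, hc⟩
        · exact ⟨Or.inr h1, fun hm => h2 (Or.inl hm)⟩
      · rintro ⟨rfl | h1, h2⟩
        · exact Or.inl rfl
        · by_cases hex : e = x
          · exact Or.inl hex
          · exact Or.inr ⟨h1, fun hm => hm.elim h2 hex⟩

theorem nodup_pvSel (S : PySem.Set PvEdge) (l : List PvEdge) : (pvSel S l).Nodup := by
  induction l generalizing S with
  | nil => simp [pvSel]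
  | cons x xs ih =>
    by_cases hc : x ∈ S
    · have hcc : PySem.Set.contains S x = true := (PySem.Set.contains_iff S x).mpr hc
      rw [pvSel, if_pos hcc]; exact ih S
    · have hcc : ¬ (PySem.Set.contains S x = true) := fun hx => hc ((PySem.Set.contains_iff S x).mp hx)
      rw [pvSel, if_neg hcc]
      refine List.Nodup.cons ?_ (ih _)
      intro hmem
      have := (mem_pvSel _ _ _).mp hmem
      exact this.2 ((PySem.Set.mem_add S x x).mpr (Or.inr rfl))

-- ---------- the two edge enumerations coincide ----------

theorem mem_pvCandA (h p w : Int) (e : PvEdge) :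
    e ∈ pvCandA h p w ↔ ∃ i j, (0 ≤ i ∧ i < h) ∧ (0 ≤ j ∧ j < pvWidth h p w i) ∧
      (e ∈ pvCand h p w i j 0 ∨ e ∈ pvCand h p w i j 1 ∨ e ∈ pvCand h p w i j 2 ∨ e ∈ pvCand h p w i j 3) := by
  have hr4 : PySem.List.pyRange 0 4 1 = [0, 1, 2, 3] := by decide
  simp only [pvCandA, List.mem_flatMap, PySem.List.mem_pyRange_one, hr4, List.flatMap_cons,
    List.flatMap_nil, List.append_nil, List.mem_append]
  constructor
  · rintro ⟨i, hi, j, hj, hm⟩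
    exact ⟨i, j, hi, hj, by tauto⟩
  · rintro ⟨i, j, hi, hj, hm⟩
    exact ⟨i, hi, j, hj, by tauto⟩


theorem mem_pvEdgesB (h p w : Int) (e : PvEdge) :
    e ∈ pvEdgesB h p w ↔ ∃ i j, (0 ≤ i ∧ i < h) ∧ (0 ≤ j ∧ j < pvWidth h p w i) ∧
      ((j + 1 < pvWidth h p w i ∧ e = ((i, j), (i, j + 1))) ∨
       (i + 1 < h ∧ j < pvWidth h p w (i + 1) ∧ e = ((i, j), (i + 1, j)))) := by
  simp only [pvEdgesB, List.mem_flatMap, PySem.List.mem_pyRange_one, List.mem_append]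
  constructor
  · rintro ⟨i, hi, j, hj, hm | hm⟩ <;>
      [skip; skip] <;>
    · rcases hm with hm
      refine ⟨i, j, hi, hj, ?_⟩
      by_cases hc : j + 1 < pvWidth h p w i <;>
        by_cases hc2 : i + 1 < h ∧ j < pvWidth h p w (i + 1) <;>
        simp [hc, hc2] at hm ⊢ <;> tauto
  · rintro ⟨i, j, hi, hj, hm⟩
    refine ⟨i, hi, j, hj, ?_⟩
    rcases hm with ⟨hc, rfl⟩ | ⟨hc1, hc2, rfl⟩
    · exact Or.inl (by simp [hc])
    · exact Or.inr (by simp [hc1, hc2])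


theorem mem_pvCand0 (h p w i j : Int) (e : PvEdge) :
    e ∈ pvCand h p w i j 0 ↔
      ¬(i < 0 ∨ j - 1 < 0 ∨ i ≥ h ∨ j - 1 ≥ w) ∧ ¬(0 ≤ i ∧ i < h - 1 ∧ j - 1 ≥ p) ∧
      e = ((i, j - 1), (i, j)) := by
  have d1 : PySem.List.pyGetD pvDxA (0:Int) 0 = 0 := by decide
  have d2 : PySem.List.pyGetD pvDyA (0:Int) 0 = -1 := by decide
  have key : ((i + 0, j + -1), (i, j)) = (((i, j - 1), (i, j)) : PvEdge) := by
    simp [Prod.ext_iff]; omega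
  simp only [pvCand, d1, d2]
  split_ifs with g1 g2 g3
  · simp only [List.not_mem_nil, false_iff]; rintro ⟨a, b, c⟩; omega
  · simp only [List.not_mem_nil, false_iff]; rintro ⟨a, b, c⟩; omega
  · rw [key]; simp only [List.mem_singleton]
    constructor
    · rintro rfl; exact ⟨by omega, by omega, rfl⟩
    · rintro ⟨-, -, rfl⟩; rfl
  · exact absurd (by omega : i + 0 < i ∨ (i + 0 = i ∧ j + -1 < j)) g3


theorem mem_pvCand1 (h p w i j : Int) (e : PvEdge) :
    e ∈ pvCand h p w i j 1 ↔
      ¬(i < 0 ∨ j + 1 < 0 ∨ i ≥ h ∨ j + 1 ≥ w) ∧ ¬(0 ≤ i ∧ i < h - 1 ∧ j + 1 ≥ p) ∧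
      e = ((i, j), (i, j + 1)) := by
  have d1 : PySem.List.pyGetD pvDxA (1:Int) 0 = 0 := by decide
  have d2 : PySem.List.pyGetD pvDyA (1:Int) 0 = 1 := by decide
  have key : ((i, j), (i + 0, j + 1)) = (((i, j), (i, j + 1)) : PvEdge) := by
    simp
  simp only [pvCand, d1, d2]
  split_ifs with g1 g2 g3
  · simp only [List.not_mem_nil, false_iff]; rintro ⟨a, b, c⟩; omega
  · simp only [List.not_mem_nil, false_iff]; rintro ⟨a, b, c⟩; omega
  · exact absurd g3 (by omega)
  · rw [key]; simp only [List.mem_singleton]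
    constructor
    · rintro rfl; exact ⟨by omega, by omega, rfl⟩
    · rintro ⟨-, -, rfl⟩; rfl


theorem mem_pvCand2 (h p w i j : Int) (e : PvEdge) :
    e ∈ pvCand h p w i j 2 ↔
      ¬(i - 1 < 0 ∨ j < 0 ∨ i - 1 ≥ h ∨ j ≥ w) ∧ ¬(0 ≤ i - 1 ∧ i - 1 < h - 1 ∧ j ≥ p) ∧
      e = ((i - 1, j), (i, j)) := by
  have d1 : PySem.List.pyGetD pvDxA (2:Int) 0 = -1 := by decide
  have d2 : PySem.List.pyGetD pvDyA (2:Int) 0 = 0 := by decide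
  have key : ((i + -1, j + 0), (i, j)) = (((i - 1, j), (i, j)) : PvEdge) := by
    simp [Prod.ext_iff]; omega
  simp only [pvCand, d1, d2]
  split_ifs with g1 g2 g3
  · simp only [List.not_mem_nil, false_iff]; rintro ⟨a, b, c⟩; omega
  · simp only [List.not_mem_nil, false_iff]; rintro ⟨a, b, c⟩; omega
  · rw [key]; simp only [List.mem_singleton]
    constructor
    · rintro rfl; exact ⟨by omega, by omega, rfl⟩
    · rintro ⟨-, -, rfl⟩; rfl
  · exact absurd (by omega : i + -1 < i ∨ (i + -1 = i ∧ j + 0 < j)) g3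


theorem mem_pvCand3 (h p w i j : Int) (e : PvEdge) :
    e ∈ pvCand h p w i j 3 ↔
      ¬(i + 1 < 0 ∨ j < 0 ∨ i + 1 ≥ h ∨ j ≥ w) ∧ ¬(0 ≤ i + 1 ∧ i + 1 < h - 1 ∧ j ≥ p) ∧
      e = ((i, j), (i + 1, j)) := by
  have d1 : PySem.List.pyGetD pvDxA (3:Int) 0 = 1 := by decide
  have d2 : PySem.List.pyGetD pvDyA (3:Int) 0 = 0 := by decide
  have key : ((i, j), (i + 1, j + 0)) = (((i, j), (i + 1, j)) : PvEdge) := by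
    simp
  simp only [pvCand, d1, d2]
  split_ifs with g1 g2 g3
  · simp only [List.not_mem_nil, false_iff]; rintro ⟨a, b, c⟩; omega
  · simp only [List.not_mem_nil, false_iff]; rintro ⟨a, b, c⟩; omega
  · exact absurd g3 (by omega)
  · rw [key]; simp only [List.mem_singleton]
    constructor
    · rintro rfl; exact ⟨by omega, by omega, rfl⟩
    · rintro ⟨-, -, rfl⟩; rfl


theorem mem_candA_iff_edgesB (h p w : Int) (hh : 1 ≤ h)
    (hpw : 2 ≤ h → p ≤ w) (e : PvEdge) :
    e ∈ pvCandA h p w ↔ e ∈ pvEdgesB h p w := by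
  have hpw' : h = 1 ∨ p ≤ w := by
    by_cases h2 : 2 ≤ h
    · exact Or.inr (hpw h2)
    · exact Or.inl (by omega)
  rw [mem_pvCandA, mem_pvEdgesB]
  constructor
  · rintro ⟨i, j, ⟨hi0, hih⟩, ⟨hj0, hjW⟩, hc | hc | hc | hc⟩
    · rw [mem_pvCand0] at hc
      obtain ⟨g1, g2, rfl⟩ := hc
      refine ⟨i, j - 1, ⟨hi0, hih⟩, ⟨by omega, ?_⟩, Or.inl ⟨?_, by simp⟩⟩ <;>
        (simp only [pvWidth] at *; split_ifs at * <;> omega)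
    · rw [mem_pvCand1] at hc
      obtain ⟨g1, g2, rfl⟩ := hc
      refine ⟨i, j, ⟨hi0, hih⟩, ⟨hj0, hjW⟩, Or.inl ⟨?_, rfl⟩⟩
      simp only [pvWidth] at *; split_ifs at * <;> omega
    · rw [mem_pvCand2] at hc
      obtain ⟨g1, g2, rfl⟩ := hc
      refine ⟨i - 1, j, ⟨by omega, by omega⟩, ⟨hj0, ?_⟩, Or.inr ⟨by omega, ?_, by simp⟩⟩ <;>
        (simp only [pvWidth] at *; split_ifs at * <;> omega)
    · rw [mem_pvCand3] at hc
      obtain ⟨g1, g2, rfl⟩ := hc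
      refine ⟨i, j, ⟨hi0, hih⟩, ⟨hj0, hjW⟩, Or.inr ⟨by omega, ?_, rfl⟩⟩
      simp only [pvWidth] at *; split_ifs at * <;> omega
  · rintro ⟨i, j, ⟨hi0, hih⟩, ⟨hj0, hjW⟩, ⟨hc, rfl⟩ | ⟨hc1, hc2, rfl⟩⟩
    · refine ⟨i, j, ⟨hi0, hih⟩, ⟨hj0, hjW⟩, Or.inr (Or.inl ?_)⟩
      rw [mem_pvCand1]
      refine ⟨?_, ?_, rfl⟩ <;> (simp only [pvWidth] at *; split_ifs at * <;> omega)
    · refine ⟨i, j, ⟨hi0, hih⟩, ⟨hj0, hjW⟩, Or.inr (Or.inr (Or.inr ?_))⟩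
      rw [mem_pvCand3]
      refine ⟨?_, ?_, rfl⟩ <;> (simp only [pvWidth] at *; split_ifs at * <;> omega)


theorem nodup_pvEdgesB (h p w : Int) : (pvEdgesB h p w).Nodup := by
  have hcell : ∀ (i j : Int) (e : PvEdge),
      e ∈ (if j + 1 < pvWidth h p w i then [((i, j), (i, j + 1))] else []) ++
          (if i + 1 < h ∧ j < pvWidth h p w (i + 1) then [((i, j), (i + 1, j))] else []) →
      e.1 = (i, j) := by
    intro i j e hm
    rcases List.mem_append.mp hm with hm | hm <;> split_ifs at hm <;> simp_all
  rw [pvEdgesB]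
  apply List.nodup_flatMap.mpr
  refine ⟨?_, ?_⟩
  · intro i _
    apply List.nodup_flatMap.mpr
    refine ⟨?_, ?_⟩
    · intro j _
      split_ifs <;> simp
    · refine (PySem.List.pairwise_lt_pyRange_one _ _).imp ?_
      intro j1 j2 hlt e he1 he2
      have e1 := hcell i j1 e he1
      have e2 := hcell i j2 e he2
      rw [e1] at e2
      simp at e2; omega
  · refine (PySem.List.pairwise_lt_pyRange_one _ _).imp ?_
    intro i1 i2 hlt e he1 he2
    obtain ⟨j1, _, hm1⟩ := List.mem_flatMap.mp he1
    obtain ⟨j2, _, hm2⟩ := List.mem_flatMap.mp he2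
    have e1 := hcell i1 j1 e hm1
    have e2 := hcell i2 j2 e hm2
    rw [e1] at e2
    simp at e2; omega


-- ---------- generic index-loop lemmas ----------

theorem pv_foldl_modify_getElem? {α : Type} (l0 : List α) (n : Nat) (F : Int → α → α) (k : Nat) :
    ((PySem.List.pyRange 0 (n : Int) 1).foldl (fun acc j => acc.modify j.toNat (F j)) l0)[k]?
      = if k < n then (l0[k]?).map (F (k : Int)) else l0[k]? := by
  induction n with
  | zero =>
    rw [show ((0 : Nat) : Int) = 0 by norm_num, PySem.List.pyRange_one_eq_nil (by omega)]
    simp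
  | succ n ih =>
    rw [show ((n + 1 : Nat) : Int) = (n : Int) + 1 by push_cast; ring,
      PySem.List.pyRange_one_succ_right (by positivity), List.foldl_append]
    simp only [List.foldl_cons, List.foldl_nil, List.getElem?_modify, ih, Int.toNat_natCast]
    rcases lt_trichotomy k n with hlt | rfl | hgt
    · have h1 : k < n + 1 := by omega
      have h2 : ¬ (n = k) := by omega
      simp only [if_pos hlt, if_pos h1, h2, if_false]
      cases l0[k]? <;> simp
    · have h1 : ¬ (k < k) := by omega
      have h2 : k < k + 1 := by omega
      simp only [if_neg h1, if_pos h2]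
      cases l0[k]? <;> simp
    · have h1 : ¬ (k < n) := by omega
      have h2 : ¬ (k < n + 1) := by omega
      have h3 : ¬ (n = k) := by omega
      simp only [if_neg h1, if_neg h2, h3, if_false]
      cases l0[k]? <;> simp


theorem pv_modify_modify_self {α : Type} (l : List α) (a : Nat) (f f' : α → α) :
    (l.modify a f).modify a f' = l.modify a (fun x => f' (f x)) := by
  apply List.ext_getElem?
  intro k
  simp only [List.getElem?_modify]
  cases l[k]? <;> simp <;> split_ifs <;> rfl


theorem pv_foldl_modify_collapse {α β : Type} (l : List β) (g : List α) (a : Nat) (G : β → α → α) :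
    l.foldl (fun acc j => acc.modify a (G j)) g = g.modify a (fun x => l.foldl (fun x j => G j x) x) := by
  induction l generalizing g with
  | nil => simp only [List.foldl_nil]; exact (List.modify_id _ _).symm
  | cons x xs ih =>
    simp only [List.foldl_cons]
    rw [ih, pv_modify_modify_self]


-- ---------- commutativity of the per-edge update ----------

theorem pv_modify_add_comm (l : List Int) (a b : Nat) (v1 v2 : Int) :
    (l.modify a (fun x => x + v1)).modify b (fun x => x + v2)
      = (l.modify b (fun x => x + v2)).modify a (fun x => x + v1) := by
  apply List.ext_getElem?
  intro k
  simp only [List.getElem?_modify]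
  cases l[k]? <;> simp <;> split_ifs <;> first | rfl | omega


theorem pvAddAt_comm (g : List (List Int)) (i1 j1 v1 i2 j2 v2 : Int) :
    pvAddAt (pvAddAt g i1 j1 v1) i2 j2 v2 = pvAddAt (pvAddAt g i2 j2 v2) i1 j1 v1 := by
  unfold pvAddAt
  by_cases hij : i1.toNat = i2.toNat
  · rw [hij, pv_modify_modify_self, pv_modify_modify_self]
    congr 1
    funext row
    exact pv_modify_add_comm row j1.toNat j2.toNat v1 v2
  · apply List.ext_getElem?
    intro k
    simp only [List.getElem?_modify]
    cases g[k]? <;> simp <;> split_ifs <;> first | rfl | omega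


theorem pvAddAt_zero (g : List (List Int)) (i j : Int) : pvAddAt g i j 0 = g := by
  unfold pvAddAt
  have hrow : ∀ row : List Int, row.modify j.toNat (fun x => x + 0) = row := by
    intro row
    apply List.ext_getElem?
    intro k
    simp only [List.getElem?_modify]
    cases row[k]? <;> simp
  simp only [hrow]
  exact List.modify_id _ _


-- the signed amount B's update adds at e.1 (and subtracts at e.2)
def pvDelta (ft : List (List Int)) (e : PvEdge) : Int :=
  let a := pvGet ft e.1.1 e.1.2
  let b := pvGet ft e.2.1 e.2.2
  let d := PySem.Int.floordiv |a - b| 5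
  if a > b then -d else if a < b then d else 0

theorem pvApplyEdge_eq (ft g : List (List Int)) (e : PvEdge) :
    pvApplyEdge ft g e
      = pvAddAt (pvAddAt g e.1.1 e.1.2 (pvDelta ft e)) e.2.1 e.2.2 (-(pvDelta ft e)) := by
  have hd : 0 ≤ PySem.Int.floordiv |pvGet ft e.1.1 e.1.2 - pvGet ft e.2.1 e.2.2| 5 := by
    rw [PySem.Int.floordiv_eq_ediv_of_pos (by norm_num)]
    exact Int.ediv_nonneg (abs_nonneg _) (by norm_num)
  simp only [pvApplyEdge, pvDelta]
  split_ifs <;>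
    (try rw [show PySem.Int.floordiv |pvGet ft e.1.1 e.1.2 - pvGet ft e.2.1 e.2.2| 5 = 0 from by omega]) <;>
    simp [pvAddAt_zero]

theorem pvAddAt_comm4 (g : List (List Int)) (i1 j1 v1 i2 j2 v2 i3 j3 v3 i4 j4 v4 : Int) :
    pvAddAt (pvAddAt (pvAddAt (pvAddAt g i1 j1 v1) i2 j2 v2) i3 j3 v3) i4 j4 v4
      = pvAddAt (pvAddAt (pvAddAt (pvAddAt g i3 j3 v3) i4 j4 v4) i1 j1 v1) i2 j2 v2 := by
  rw [pvAddAt_comm (pvAddAt g i1 j1 v1) i2 j2 v2 i3 j3 v3]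
  rw [pvAddAt_comm g i1 j1 v1 i3 j3 v3]
  rw [pvAddAt_comm (pvAddAt (pvAddAt g i3 j3 v3) i1 j1 v1) i2 j2 v2 i4 j4 v4]
  rw [pvAddAt_comm (pvAddAt g i3 j3 v3) i1 j1 v1 i4 j4 v4]

theorem pvApplyEdge_comm (ft g : List (List Int)) (e1 e2 : PvEdge) :
    pvApplyEdge ft (pvApplyEdge ft g e1) e2 = pvApplyEdge ft (pvApplyEdge ft g e2) e1 := by
  rw [pvApplyEdge_eq, pvApplyEdge_eq, pvApplyEdge_eq, pvApplyEdge_eq]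
  exact pvAddAt_comm4 g _ _ _ _ _ _ _ _ _ _ _ _

-- ---------- phase 1: the two up_and_down grids agree ----------

theorem pv_up_eq (ft : List (List Int)) (h p w : Int) (hh : 1 ≤ h)
    (hpw : 2 ≤ h → p ≤ w) (up0 : List (List Int)) :
    (pvFoldVis ft ((PySem.Set.empty : PySem.Set PvEdge), up0) (pvCandA h p w)).2
      = (pvEdgesB h p w).foldl (pvApplyEdge ft) up0 := by
  rw [pvFoldVis_snd]
  have hperm : (pvSel PySem.Set.empty (pvCandA h p w)).Perm (pvEdgesB h p w) := by
    rw [List.perm_ext_iff_of_nodup (nodup_pvSel _ _) (nodup_pvEdgesB h p w)]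
    intro e
    rw [mem_pvSel, mem_candA_iff_edgesB h p w hh hpw]
    simp [PySem.Set.empty]
  exact @List.Perm.foldl_eq _ _ (pvApplyEdge ft) _ _ ⟨fun b a1 a2 => pvApplyEdge_comm ft b a1 a2⟩ hperm up0


-- ---------- phase 2: add-back loop vs row rebuilding ----------

theorem pvGet_eq (ft : List (List Int)) (k m : Nat) (row : List Int)
    (hrow : ft[k]? = some row) (hm : m < row.length) :
    pvGet ft (k : Int) (m : Int) = row[m] := by
  unfold pvGet
  rw [PySem.List.pyGetD_natCast, PySem.List.pyGetD_natCast,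
    show ft.getD k [] = row from by rw [List.getD_eq_getElem?_getD, hrow]; rfl,
    List.getD_eq_getElem?_getD, List.getElem?_eq_getElem hm]
  rfl

theorem pv_row_update (ft up : List (List Int)) (k : Nat) (row : List Int)
    (hrow : ft[k]? = some row) (wn : Nat) (hwn : wn ≤ row.length) :
    (PySem.List.pyRange 0 (wn : Int) 1).foldl
        (fun r j => r.modify j.toNat (fun x => x + pvGet up (k : Int) j)) row
      = (PySem.List.pyRange 0 (wn : Int) 1).map
          (fun j => pvGet ft (k : Int) j + pvGet up (k : Int) j) ++ row.drop wn := by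
  apply List.ext_getElem?
  intro m
  rw [pv_foldl_modify_getElem? row wn (fun j x => x + pvGet up (k : Int) j) m,
    List.getElem?_append]
  have hlen : (List.map (fun j => pvGet ft (k : Int) j + pvGet up (k : Int) j)
      (PySem.List.pyRange 0 (wn : Int) 1)).length = wn := by
    simp [PySem.List.length_pyRange_one]
  rw [hlen]
  by_cases hm : m < wn
  · rw [if_pos hm, if_pos hm, PySem.List.getElem?_map_pyRange_zero _ wn m hm]
    have hmrow : m < row.length := lt_of_lt_of_le hm hwn
    rw [List.getElem?_eq_getElem hmrow]
    simp [pvGet_eq ft k m row hrow hmrow]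
  · rw [if_neg hm, if_neg hm, List.getElem?_drop]
    congr 1
    omega

theorem pv_phase2_eq (ft up : List (List Int)) (p w : Int)
    (hft : ft ≠ [])
    (hpn : ∀ r ∈ ft.dropLast, p.toNat ≤ r.length) (hp : 0 ≤ p)
    (hwn : w = ((ft.getLast?.getD []).length : Int)) :
    (PySem.List.pyRange 0 (ft.length : Int) 1).foldl (fun acc i =>
        if i ≠ (ft.length : Int) - 1 then
          (PySem.List.pyRange 0 p 1).foldl (fun acc j => pvAddAt acc i j (pvGet up i j)) acc
        else
          (PySem.List.pyRange 0 w 1).foldl (fun acc j => pvAddAt acc i j (pvGet up i j)) acc) ft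
      = (PySem.List.pyRange 0 (ft.length : Int) 1).map (fun i =>
          (PySem.List.pyRange 0 (pvWidth (ft.length : Int) p w i) 1).map
            (fun j => pvGet ft i j + pvGet up i j) ++
          PySem.List.slice (PySem.List.pyGetD ft i []) (some (pvWidth (ft.length : Int) p w i)) none) := by
  have hn1 : 0 < ft.length := List.length_pos_of_ne_nil hft
  have hw0 : 0 ≤ w := by rw [hwn]; positivity
  -- unify the row branch into a single pvWidth-bounded loop
  have hbody : ∀ (acc : List (List Int)) (i : Int),
      (if i ≠ (ft.length : Int) - 1 then
        (PySem.List.pyRange 0 p 1).foldl (fun acc j => pvAddAt acc i j (pvGet up i j)) acc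
      else
        (PySem.List.pyRange 0 w 1).foldl (fun acc j => pvAddAt acc i j (pvGet up i j)) acc)
      = acc.modify i.toNat (fun row =>
          (PySem.List.pyRange 0 (pvWidth (ft.length : Int) p w i) 1).foldl
            (fun row j => row.modify j.toNat (fun x => x + pvGet up i j)) row) := by
    intro acc i
    have : ∀ n : Int, (PySem.List.pyRange 0 n 1).foldl (fun acc j => pvAddAt acc i j (pvGet up i j)) acc
        = acc.modify i.toNat (fun row =>
            (PySem.List.pyRange 0 n 1).foldl
              (fun row j => row.modify j.toNat (fun x => x + pvGet up i j)) row) := by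
      intro n
      simp only [pvAddAt]
      exact pv_foldl_modify_collapse _ _ _ _
    unfold pvWidth
    split_ifs <;> apply this
  have step1 := PySem.List.foldl_congr_mem (PySem.List.pyRange 0 (ft.length : Int) 1)
    _ (fun acc i => acc.modify i.toNat (fun row =>
        (PySem.List.pyRange 0 (pvWidth (ft.length : Int) p w i) 1).foldl
          (fun row j => row.modify j.toNat (fun x => x + pvGet up i j)) row))
    ft (fun acc i _ => hbody acc i)
  rw [step1]
  apply List.ext_getElem?
  intro k
  rw [pv_foldl_modify_getElem? ft ft.length (fun i row =>
      (PySem.List.pyRange 0 (pvWidth (ft.length : Int) p w i) 1).foldl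
        (fun row j => row.modify j.toNat (fun x => x + pvGet up i j)) row) k]
  by_cases hk : k < ft.length
  · rw [if_pos hk, PySem.List.getElem?_map_pyRange_zero _ ft.length k hk,
      List.getElem?_eq_getElem hk, Option.map_some]
    have hrow : ft[k]? = some ft[k] := List.getElem?_eq_getElem hk
    have hW0 : 0 ≤ pvWidth (ft.length : Int) p w (k : Int) := by
      unfold pvWidth
      split_ifs
      · exact hp
      · exact hw0
    obtain ⟨wk, hWn⟩ : ∃ wk : Nat, pvWidth (ft.length : Int) p w (k : Int) = (wk : Int) :=
      ⟨_, (Int.toNat_of_nonneg hW0).symm⟩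
    rw [hWn]
    have hgd : PySem.List.pyGetD ft ((k : Nat) : Int) [] = ft[k] := by
      rw [PySem.List.pyGetD_natCast, List.getD_eq_getElem?_getD, hrow]
      rfl
    have hWle : wk ≤ ft[k].length := by
      by_cases hk1 : (k : Int) ≠ (ft.length : Int) - 1
      · have hp' : (wk : Int) = p := by rw [← hWn]; unfold pvWidth; rw [if_pos hk1]
        have hkdl : k < ft.dropLast.length := by
          rw [List.length_dropLast]
          omega
        have hmem : ft[k] ∈ ft.dropLast := by
          have hdk : ft.dropLast[k] = ft[k] := List.getElem_dropLast ..
          rw [← hdk]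
          exact List.getElem_mem _
        have := hpn _ hmem
        omega
      · have hw' : (wk : Int) = w := by rw [← hWn]; unfold pvWidth; rw [if_neg hk1]
        have hlast : ft.getLast?.getD [] = ft[k] := by
          rw [List.getLast?_eq_getElem?, show ft.length - 1 = k from by omega, hrow]
          rfl
        rw [hwn, hlast] at hw'
        omega
    rw [pv_row_update ft up k ft[k] hrow wk hWle, hgd, PySem.List.slice_from_natCast]
  · rw [if_neg hk, List.getElem?_eq_none (le_of_not_gt hk), List.getElem?_eq_none
      (by simp only [List.length_map, PySem.List.length_pyRange_one]; omega)]



theorem pv_scan_eq (ft : List (List Int)) (h p w : Int)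
    (init : PySem.Set PvEdge × List (List Int)) :
    (PySem.List.pyRange 0 h 1).foldl (fun st i =>
      if i ≠ h - 1 then
        (PySem.List.pyRange 0 p 1).foldl (fun st j =>
          (PySem.List.pyRange 0 4 1).foldl (fun st t => pvStepA ft h p w st i j t) st) st
      else
        (PySem.List.pyRange 0 w 1).foldl (fun st j =>
          (PySem.List.pyRange 0 4 1).foldl (fun st t => pvStepA ft h p w st i j t) st) st) init
      = pvFoldVis ft init (pvCandA h p w) := by
  have hT : ∀ (st : PySem.Set PvEdge × List (List Int)) (i j : Int),
      (PySem.List.pyRange 0 4 1).foldl (fun st t => pvStepA ft h p w st i j t) st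
        = pvFoldVis ft st ((PySem.List.pyRange 0 4 1).flatMap (fun t => pvCand h p w i j t)) := by
    intro st i j
    rw [PySem.List.foldl_congr_mem (PySem.List.pyRange 0 4 1) _
      (fun st t => pvFoldVis ft st (pvCand h p w i j t)) st
      (fun st t _ => pvStepA_eq ft h p w st i j t)]
    exact (List.foldl_flatMap).symm
  have hJ : ∀ (st : PySem.Set PvEdge × List (List Int)) (i : Int),
      (if i ≠ h - 1 then
        (PySem.List.pyRange 0 p 1).foldl (fun st j =>
          (PySem.List.pyRange 0 4 1).foldl (fun st t => pvStepA ft h p w st i j t) st) st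
      else
        (PySem.List.pyRange 0 w 1).foldl (fun st j =>
          (PySem.List.pyRange 0 4 1).foldl (fun st t => pvStepA ft h p w st i j t) st) st)
        = pvFoldVis ft st ((PySem.List.pyRange 0 (pvWidth h p w i) 1).flatMap (fun j =>
            (PySem.List.pyRange 0 4 1).flatMap (fun t => pvCand h p w i j t))) := by
    intro st i
    have hJn : ∀ (n : Int) (st : PySem.Set PvEdge × List (List Int)),
        (PySem.List.pyRange 0 n 1).foldl (fun st j =>
          (PySem.List.pyRange 0 4 1).foldl (fun st t => pvStepA ft h p w st i j t) st) st
          = pvFoldVis ft st ((PySem.List.pyRange 0 n 1).flatMap (fun j =>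
              (PySem.List.pyRange 0 4 1).flatMap (fun t => pvCand h p w i j t))) := by
      intro n st
      rw [PySem.List.foldl_congr_mem (PySem.List.pyRange 0 n 1) _
        (fun st j => pvFoldVis ft st ((PySem.List.pyRange 0 4 1).flatMap (fun t => pvCand h p w i j t))) st
        (fun st j _ => hT st i j)]
      exact (List.foldl_flatMap).symm
    unfold pvWidth
    split_ifs <;> apply hJn
  rw [PySem.List.foldl_congr_mem (PySem.List.pyRange 0 h 1) _
    (fun st i => pvFoldVis ft st ((PySem.List.pyRange 0 (pvWidth h p w i) 1).flatMap (fun j =>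
      (PySem.List.pyRange 0 4 1).flatMap (fun t => pvCand h p w i j t)))) init
    (fun st i _ => hJ st i)]
  exact (List.foldl_flatMap).symm

theorem control_fish_number_spec : Claim_equal_control_fish_number := by
  intro ft _ hpre
  obtain ⟨hne, hrest⟩ := hpre
  have hlen : 0 < ft.length := List.length_pos_of_ne_nil hne
  have hh : (1 : Int) ≤ (ft.length : Int) := by exact_mod_cast hlen
  have hphead : PySem.List.pyGetD ft 0 [] = ft.headI := by
    rw [PySem.List.pyGetD_zero]
    cases ft with
    | nil => exact absurd rfl hne
    | cons x xs => rfl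
  have hwlast : PySem.List.pyGetD ft ((ft.length : Int) - 1) [] = ft.getLast?.getD [] := by
    rw [show (ft.length : Int) - 1 = ((ft.length - 1 : Nat) : Int) from by omega,
      PySem.List.pyGetD_natCast, List.getD_eq_getElem?_getD, ← List.getLast?_eq_getElem?]
  have hpw : 2 ≤ (ft.length : Int) →
      ((PySem.List.pyGetD ft 0 []).length : Int) ≤ ((PySem.List.pyGetD ft ((ft.length : Int) - 1) []).length : Int) := by
    intro h2
    rw [hphead, hwlast]
    exact_mod_cast (hrest (by omega)).1
  have hpn : ∀ r ∈ ft.dropLast, ((PySem.List.pyGetD ft 0 []).length : Int).toNat ≤ r.length := by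
    intro r hr
    by_cases h1 : 1 < ft.length
    · have := (hrest h1).2 r hr
      rw [hphead]
      simpa using this
    · exfalso
      have h0 : ft.dropLast.length = 0 := by rw [List.length_dropLast]; omega
      rw [List.eq_nil_of_length_eq_zero h0] at hr
      exact absurd hr (List.not_mem_nil)
  show control_fish_number ft = control_fish_number_alt ft
  simp only [control_fish_number, control_fish_number_alt]
  rw [pv_scan_eq ft (ft.length : Int) ((PySem.List.pyGetD ft 0 []).length : Int)
      ((PySem.List.pyGetD ft ((ft.length : Int) - 1) []).length : Int) _,
    pv_up_eq ft _ _ _ hh hpw _]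
  exact pv_phase2_eq ft _ _ _ hne hpn (by positivity)
    (by rw [hwlast])
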